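-- pv_equiv track=rewrite | github.com/C7C4FF/PS | Programmers/118667.py | solution
-- ===== SOURCE A (Python) =====
-- from collections import deque
--
-- def solution(queue1, queue2):
--     q1 = deque(queue1)
--     q2 = deque(queue2)
--
--     sum_q1 = sum(q1)
--     sum_q2 = sum(q2)
--
--     total = sum_q1 + sum_q2
--
--     # 홀수거나 원소 하나가 절반보다 크면 불가능
--     if total % 2 != 0:
--         return -1
--
--     half = total // 2
--
--     if max(queue1 + queue2) > half:
--         return -1
--
--
--     count = 0
--
--     while sum_q1 != sum_q2:
--         if sum_q1 > sum_q2: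
--             val = q1.popleft()
--             sum_q1 -= val
--             q2.append(val)
--             sum_q2 += val
--         else:
--             val = q2.popleft()
--             sum_q2 -= val
--             q1.append(val)
--             sum_q1 += val
--
--         count += 1
--
--         if count >= 300000:
--             return -1
--
--     return count
-- ===== SOURCE B (Python) =====
-- def solution(queue1, queue2):
--     total = sum(queue1) + sum(queue2)
--     if total % 2 != 0:
--         return -1
--     half = total // 2
--     cells = queue1 + queue2
--     if max(cells) > half:
--         return -1
--     n = len(cells)
--     # circular window [l, r) over cells; wsum is its sum (queue1's side)
--     l, r = 0, len(queue1) % n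
--     wsum = sum(queue1)
--     seen = set()
--     for count in range(300000):
--         if wsum == half:
--             return count
--         key = (l, r, wsum)
--         if key in seen:
--             return -1  # state already visited: the process is periodic, equality is unreachable
--         seen.add(key)
--         if wsum > half:
--             wsum -= cells[l]
--             l = (l + 1) % n
--         else:
--             wsum += cells[r]
--             r = (r + 1) % n
--     return -1
-- ===== Notes on version B (the rewrite author's own statement) =====
-- stated objective: alternative
-- what changed: Replaces A's deque-rotation simulation by iteration of a pure state (circular-window indices reduced mod n plus one window sum) with cycle detection: every state is recorded in a visited set and a repeated state returns -1 immediately, since the deterministic process is periodic from there, rather than running the remaining steps of the 300000-step budget.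
import Mathlib
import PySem

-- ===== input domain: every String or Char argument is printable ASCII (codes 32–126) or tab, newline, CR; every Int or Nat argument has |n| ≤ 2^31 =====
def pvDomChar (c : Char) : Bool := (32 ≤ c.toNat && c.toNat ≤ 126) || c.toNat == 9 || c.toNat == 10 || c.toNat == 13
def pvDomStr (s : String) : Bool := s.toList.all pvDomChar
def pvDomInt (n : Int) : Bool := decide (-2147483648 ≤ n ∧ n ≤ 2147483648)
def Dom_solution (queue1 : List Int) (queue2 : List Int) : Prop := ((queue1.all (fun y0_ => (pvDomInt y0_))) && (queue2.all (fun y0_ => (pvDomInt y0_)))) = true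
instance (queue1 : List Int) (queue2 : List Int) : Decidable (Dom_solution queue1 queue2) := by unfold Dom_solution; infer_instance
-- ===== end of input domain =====

-- B replaces A's deque-rotation simulation by iteration of a pure state (circular-window indices
-- reduced mod n plus window sum) with cycle detection in a visited-state set: a repeated state
-- proves equality unreachable, so B returns -1 there without consuming the remaining step budget.

-- ===== PORT A =====
-- while loop of A: fuel = 300000 - count (Python returns -1 as soon as count reaches 300000).
def solutionLoopA (fuel : Nat) (q1 q2 : List Int) (s1 s2 count : Int) : Int :=
  match fuel with
  | 0 => -1                                   -- count >= 300000  →  return -1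
  | f + 1 =>
    if s1 = s2 then count
    else if s1 > s2 then
      match q1 with
      | [] => -1                              -- deque.popleft on empty: IndexError, excluded by Pre_
      | v :: q1' => solutionLoopA f q1' (q2 ++ [v]) (s1 - v) (s2 + v) (count + 1)
    else
      match q2 with
      | [] => -1                              -- deque.popleft on empty: IndexError, excluded by Pre_
      | v :: q2' => solutionLoopA f (q1 ++ [v]) q2' (s1 + v) (s2 - v) (count + 1)

def solution (queue1 : List Int) (queue2 : List Int) : Int :=
  let sumQ1 := queue1.sum
  let sumQ2 := queue2.sum
  let total := sumQ1 + sumQ2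
  if PySem.Int.mod total 2 ≠ 0 then -1
  else
    let half := PySem.Int.floordiv total 2
    match PySem.List.max? (queue1 ++ queue2) (fun x => x) with
    | none => -1                              -- max([]) raises ValueError, excluded by Pre_
    | some m =>
      if m > half then -1
      else solutionLoopA 300000 queue1 queue2 sumQ1 sumQ2 0

-- ===== PORT B =====
-- for count in range(300000) with the visited-state set `seen`; l, r are kept reduced mod n,
-- so cells[l] / cells[r] are always in range and List.getD is exact Python indexing here.
def solutionLoopB (C : List Int) (n : Nat) (half : Int) (fuel : Nat)
    (seen : PySem.Set (Nat × Nat × Int)) (l r : Nat) (wsum count : Int) : Int :=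
  match fuel with
  | 0 => -1                                   -- range exhausted  →  return -1
  | f + 1 =>
    if wsum = half then count
    else if PySem.Set.contains seen (l, r, wsum) then -1   -- periodic: equality unreachable
    else
      let seen' := PySem.Set.add seen (l, r, wsum)
      if wsum > half then
        solutionLoopB C n half f seen' ((l + 1) % n) r (wsum - C.getD l 0) (count + 1)
      else
        solutionLoopB C n half f seen' l ((r + 1) % n) (wsum + C.getD r 0) (count + 1)

def solution_alt (queue1 : List Int) (queue2 : List Int) : Int :=
  let total := queue1.sum + queue2.sum
  if PySem.Int.mod total 2 ≠ 0 then -1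
  else
    let half := PySem.Int.floordiv total 2
    let cells := queue1 ++ queue2
    match PySem.List.max? cells (fun x => x) with
    | none => -1                              -- max([]) raises ValueError, excluded by Pre_
    | some m =>
      if m > half then -1
      else solutionLoopB cells cells.length half 300000 PySem.Set.empty
             0 (queue1.length % cells.length) queue1.sum 0

-- ===== PRECONDITION & SPEC =====
-- Pre_ excludes exactly the inputs on which A raises: both queues empty (max([]) is a ValueError),
-- and the one-sided configurations [] vs [x] (x negative even) or [] vs [x,x] (x negative), on
-- which A's rotation loop pops from an empty deque (IndexError).
def pvBadSide_solution (b : List Int) : Prop :=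
  (b.length = 1 ∧ b.getD 0 0 < 0 ∧ b.getD 0 0 % 2 = 0) ∨
  (b.length = 2 ∧ b.getD 0 0 = b.getD 1 0 ∧ b.getD 0 0 < 0)

def Pre_solution (queue1 : List Int) (queue2 : List Int) : Prop :=
  ¬ ((queue1 = [] ∧ queue2 = []) ∨
     (queue1 = [] ∧ pvBadSide_solution queue2) ∨
     (queue2 = [] ∧ pvBadSide_solution queue1))

instance (queue1 : List Int) (queue2 : List Int) : Decidable (Pre_solution queue1 queue2) := by
  unfold Pre_solution pvBadSide_solution; infer_instance

def pvWitness_solution : List Int × List Int := ([3, 2, 7, 2], [4, 6, 5, 1])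

def Spec_solution (queue1 : List Int) (queue2 : List Int) (out : Int) : Prop := out = solution_alt queue1 queue2
instance (queue1 : List Int) (queue2 : List Int) (out : Int) : Decidable (Spec_solution queue1 queue2 out) := by unfold Spec_solution; infer_instance

-- ===== CLAIM (what is proved, stated in full; the proofs are below) =====
def Claim_equal_solution : Prop := ∀ (queue1 : List Int) (queue2 : List Int), Dom_solution queue1 queue2 → Pre_solution queue1 queue2 → Spec_solution queue1 queue2 (solution queue1 queue2)

-- ===== LEMMAS AND PROOFS =====

-- B's state is pure: the key (l, r, wsum) determines the next key.
def stepK (C : List Int) (n : Nat) (half : Int) (k : Nat × Nat × Int) : Nat × Nat × Int :=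
  if k.2.2 > half then ((k.1 + 1) % n, k.2.1, k.2.2 - C.getD k.1 0)
  else (k.1, (k.2.1 + 1) % n, k.2.2 + C.getD k.2.1 0)

-- the key corresponding to A's state (q1, q2) where q1 ++ q2 = C.rotate l
def keyOf (C : List Int) (q1 : List Int) (l : Nat) : Nat × Nat × Int :=
  (l, (l + q1.length) % C.length, q1.sum)

theorem loopA_succ (f : Nat) (q1 q2 : List Int) (s1 s2 count : Int) :
    solutionLoopA (f + 1) q1 q2 s1 s2 count =
      if s1 = s2 then count
      else if s1 > s2 then
        match q1 with
        | [] => -1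
        | v :: q1' => solutionLoopA f q1' (q2 ++ [v]) (s1 - v) (s2 + v) (count + 1)
      else
        match q2 with
        | [] => -1
        | v :: q2' => solutionLoopA f (q1 ++ [v]) q2' (s1 + v) (s2 - v) (count + 1) := rfl

theorem loopB_succ (C : List Int) (n : Nat) (half : Int) (f : Nat)
    (seen : PySem.Set (Nat × Nat × Int)) (l r : Nat) (wsum count : Int) :
    solutionLoopB C n half (f + 1) seen l r wsum count =
      if wsum = half then count
      else if PySem.Set.contains seen (l, r, wsum) then -1
      else if wsum > half then
        solutionLoopB C n half f (PySem.Set.add seen (l, r, wsum)) ((l + 1) % n) r (wsum - C.getD l 0) (count + 1)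
      else
        solutionLoopB C n half f (PySem.Set.add seen (l, r, wsum)) l ((r + 1) % n) (wsum + C.getD r 0) (count + 1) := rfl

-- one "drain" step (wsum > half): A pops q1's head v = C[l]; the rotation advances
theorem step_drain (C q1 q2 : List Int) (l : Nat) (half : Int)
    (hhalf : C.sum = 2 * half) (hpos : 0 ≤ C.sum)
    (hql : q1 ++ q2 = C.rotate l) (hl : l < C.length)
    (hgt : half < q1.sum) :
    ∃ v q1t, q1 = v :: q1t ∧ C.getD l 0 = v ∧
      q1t ++ (q2 ++ [v]) = C.rotate ((l + 1) % C.length) ∧ (l + 1) % C.length < C.length ∧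
      keyOf C q1t ((l + 1) % C.length) = stepK C C.length half (keyOf C q1 l) := by
  have hn : 0 < C.length := Nat.lt_of_le_of_lt (Nat.zero_le l) hl
  have hq1ne : q1 ≠ [] := by
    intro h; rw [h] at hgt; simp at hgt; omega
  obtain ⟨v, q1t, rfl⟩ := List.exists_cons_of_ne_nil hq1ne
  have hlt0 : 0 < (C.rotate l).length := by rw [List.length_rotate]; exact hn
  have hA : (C.rotate l).getD 0 0 = v := by rw [← hql]; simp
  have hB : (C.rotate l).getD 0 0 = C.getD (l % C.length) 0 := by
    rw [List.getD_eq_getElem _ 0 hlt0, List.getD_eq_getElem _ 0 (Nat.mod_lt _ hn)]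
    have h0 := List.getElem_rotate C l 0 hlt0
    simpa using h0
  have hget : C.getD l 0 = v := by
    rw [← Nat.mod_eq_of_lt hl, ← hB, hA]
  refine ⟨v, q1t, rfl, hget, ?_, Nat.mod_lt _ hn, ?_⟩
  · rw [List.rotate_mod, ← List.rotate_rotate C l 1, ← hql]
    simp [List.rotate_cons_succ]
  · unfold keyOf stepK
    simp only [List.sum_cons, List.length_cons]
    rw [if_pos (by simpa using hgt)]
    refine Prod.ext rfl (Prod.ext ?_ ?_)
    · show ((l + 1) % C.length + q1t.length) % C.length = (l + (q1t.length + 1)) % C.length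
      rw [Nat.mod_add_mod]
      congr 1; omega
    · show q1t.sum = v + q1t.sum - C.getD l 0
      rw [hget]; ring

-- one "fill" step (wsum < half): A pops q2's head v = C[(l + |q1|) % n]
theorem step_fill (C q1 q2 : List Int) (l : Nat) (half : Int)
    (hhalf : C.sum = 2 * half) (hpos : 0 ≤ C.sum)
    (hql : q1 ++ q2 = C.rotate l) (hl : l < C.length)
    (hne : q1.sum ≠ half) (hlt : ¬ half < q1.sum) :
    ∃ v q2t, q2 = v :: q2t ∧ C.getD ((l + q1.length) % C.length) 0 = v ∧
      (q1 ++ [v]) ++ q2t = C.rotate l ∧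
      keyOf C (q1 ++ [v]) l = stepK C C.length half (keyOf C q1 l) := by
  have hn : 0 < C.length := Nat.lt_of_le_of_lt (Nat.zero_le l) hl
  have hsum : q1.sum + q2.sum = C.sum := by
    have hp : (C.rotate l).sum = C.sum := (List.rotate_perm C l).sum_eq
    rw [← hql, List.sum_append] at hp; exact hp
  have hq2ne : q2 ≠ [] := by
    intro h; rw [h] at hsum; simp at hsum; omega
  obtain ⟨v, q2t, rfl⟩ := List.exists_cons_of_ne_nil hq2ne
  have hq1lt : q1.length < (C.rotate l).length := by
    rw [List.length_rotate]
    have hlen := congrArg List.length hql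
    simp at hlen; omega
  have hA : (C.rotate l).getD q1.length 0 = v := by
    rw [← hql]
    have hlt' : q1.length < (q1 ++ v :: q2t).length := by simp
    rw [List.getD_eq_getElem _ 0 hlt', List.getElem_append_right (le_refl q1.length)]
    simp
  have hB : (C.rotate l).getD q1.length 0 = C.getD ((l + q1.length) % C.length) 0 := by
    rw [List.getD_eq_getElem _ 0 hq1lt, List.getD_eq_getElem _ 0 (Nat.mod_lt _ hn)]
    have h0 := List.getElem_rotate C l q1.length hq1lt
    simpa [Nat.add_comm] using h0
  have hget : C.getD ((l + q1.length) % C.length) 0 = v := by rw [← hB]; exact hA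
  refine ⟨v, q2t, rfl, hget, ?_, ?_⟩
  · rw [List.append_assoc]; simpa using hql
  · unfold keyOf stepK
    simp only [List.sum_append, List.length_append, List.sum_cons, List.sum_nil,
      List.length_cons, List.length_nil]
    rw [if_neg (by simpa using hlt)]
    refine Prod.ext rfl (Prod.ext ?_ ?_)
    · show (l + (q1.length + (0 + 1))) % C.length = ((l + q1.length) % C.length + 1) % C.length
      rw [Nat.mod_add_mod]
      congr 1
    · show q1.sum + (v + 0) = q1.sum + C.getD ((l + q1.length) % C.length) 0
      rw [hget]; ring

-- if the pure trajectory never reaches wsum = half, A's loop exhausts its budget: -1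
theorem loopA_neverHalf (C : List Int) (half : Int)
    (hhalf : C.sum = 2 * half) (hpos : 0 ≤ C.sum) :
    ∀ (fuel : Nat) (q1 q2 : List Int) (l : Nat) (count : Int),
      q1 ++ q2 = C.rotate l → l < C.length →
      (∀ i : Nat, ((stepK C C.length half)^[i] (keyOf C q1 l)).2.2 ≠ half) →
      solutionLoopA fuel q1 q2 q1.sum q2.sum count = -1 := by
  intro fuel
  induction fuel with
  | zero => intro q1 q2 l count _ _ _; rfl
  | succ f ih =>
    intro q1 q2 l count hql hl hiter
    have hsum : q1.sum + q2.sum = C.sum := by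
      have hp : (C.rotate l).sum = C.sum := (List.rotate_perm C l).sum_eq
      rw [← hql, List.sum_append] at hp; exact hp
    have h0 : q1.sum ≠ half := by simpa [keyOf] using hiter 0
    have hne : q1.sum ≠ q2.sum := by omega
    have hshift : ∀ (k : Nat × Nat × Int), k = stepK C C.length half (keyOf C q1 l) →
        ∀ i : Nat, ((stepK C C.length half)^[i] k).2.2 ≠ half := by
      intro k hk i
      rw [hk, ← Function.iterate_succ_apply]
      exact hiter (i + 1)
    by_cases hgt : half < q1.sum
    · obtain ⟨v, q1t, rfl, hget, hrot, hl', hkey⟩ :=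
        step_drain C q1 q2 l half hhalf hpos hql hl hgt
      have hgt' : (v :: q1t).sum > q2.sum := by omega
      have hstepA : solutionLoopA (f + 1) (v :: q1t) q2 ((v :: q1t).sum) q2.sum count
          = solutionLoopA f q1t (q2 ++ [v]) q1t.sum ((q2 ++ [v]).sum) (count + 1) := by
        rw [loopA_succ, if_neg hne, if_pos hgt']
        simp
      rw [hstepA]
      exact ih q1t (q2 ++ [v]) ((l + 1) % C.length) (count + 1) hrot hl'
        (hshift _ hkey)
    · obtain ⟨v, q2t, rfl, hget, hrot, hkey⟩ :=
        step_fill C q1 q2 l half hhalf hpos hql hl h0 hgt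
      have hlt' : ¬ q1.sum > (v :: q2t).sum := by omega
      have hstepA : solutionLoopA (f + 1) q1 (v :: q2t) q1.sum ((v :: q2t).sum) count
          = solutionLoopA f (q1 ++ [v]) q2t ((q1 ++ [v]).sum) q2t.sum (count + 1) := by
        rw [loopA_succ, if_neg hne, if_neg hlt']
        simp
      rw [hstepA]
      exact ih (q1 ++ [v]) q2t l (count + 1) hrot hl (hshift _ hkey)

-- once the trajectory repeats a state it stays inside the visited cycle forever
theorem iterate_periodic {α : Type} (f : α → α) (k0 : α) (j c : Nat) (hjc : j < c)
    (heq : f^[c] k0 = f^[j] k0) :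
    ∀ i : Nat, ∃ m, j ≤ m ∧ m < c ∧ f^[i] (f^[c] k0) = f^[m] k0 := by
  intro i
  induction i with
  | zero => exact ⟨j, le_refl j, hjc, by simpa using heq⟩
  | succ i ih =>
    obtain ⟨m, hjm, hmc, hm⟩ := ih
    by_cases h : m + 1 < c
    · refine ⟨m + 1, by omega, h, ?_⟩
      calc f^[i + 1] (f^[c] k0) = f (f^[i] (f^[c] k0)) := Function.iterate_succ_apply' f i _
        _ = f (f^[m] k0) := by rw [hm]
        _ = f^[m + 1] k0 := (Function.iterate_succ_apply' f m k0).symm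
    · have hmc' : m + 1 = c := by omega
      refine ⟨j, le_refl j, hjc, ?_⟩
      calc f^[i + 1] (f^[c] k0) = f (f^[i] (f^[c] k0)) := Function.iterate_succ_apply' f i _
        _ = f (f^[m] k0) := by rw [hm]
        _ = f^[m + 1] k0 := (Function.iterate_succ_apply' f m k0).symm
        _ = f^[c] k0 := by rw [hmc']
        _ = f^[j] k0 := heq

-- the simulation invariant: A's deques are the rotation of C by l; B's seen set holds exactly
-- the keys of the first c states of the pure trajectory, none of which has wsum = half
theorem loop_sim (C : List Int) (half : Int)
    (hhalf : C.sum = 2 * half) (hpos : 0 ≤ C.sum) :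
    ∀ (fuel : Nat) (q1 q2 : List Int) (l : Nat) (count : Int) (c : Nat)
      (k0 : Nat × Nat × Int) (seen : PySem.Set (Nat × Nat × Int)),
      q1 ++ q2 = C.rotate l → l < C.length →
      keyOf C q1 l = (stepK C C.length half)^[c] k0 →
      (∀ k, k ∈ seen → ∃ m, m < c ∧ k = (stepK C C.length half)^[m] k0) →
      (∀ m, m < c → ((stepK C C.length half)^[m] k0).2.2 ≠ half) →
      solutionLoopA fuel q1 q2 q1.sum q2.sum count
        = solutionLoopB C C.length half fuel seen l ((l + q1.length) % C.length) q1.sum count := by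
  intro fuel
  induction fuel with
  | zero => intro q1 q2 l count c k0 seen _ _ _ _ _; rfl
  | succ f ih =>
    intro q1 q2 l count c k0 seen hql hl hkey hseen hnh
    have hsum : q1.sum + q2.sum = C.sum := by
      have hp : (C.rotate l).sum = C.sum := (List.rotate_perm C l).sum_eq
      rw [← hql, List.sum_append] at hp; exact hp
    by_cases h1 : q1.sum = half
    · have h12 : q1.sum = q2.sum := by omega
      rw [loopA_succ, loopB_succ, if_pos h12, if_pos h1]
    · have hne : q1.sum ≠ q2.sum := by omega
      rw [loopB_succ, if_neg h1]
      by_cases hmem : (l, (l + q1.length) % C.length, q1.sum) ∈ seen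
      · -- revisited state: B returns -1; A never reaches equality, so A returns -1 too
        rw [if_pos ((PySem.Set.contains_iff _ _).mpr hmem)]
        obtain ⟨j, hjc, hj⟩ := hseen _ hmem
        have hj' : (stepK C C.length half)^[c] k0 = (stepK C C.length half)^[j] k0 := by
          rw [← hkey, ← hj]; rfl
        have hjc' : j < c := by
          rcases Nat.lt_or_ge j c with h | h
          · exact h
          · exact absurd hjc (by omega)
        have hiter : ∀ i : Nat, ((stepK C C.length half)^[i] (keyOf C q1 l)).2.2 ≠ half := by
          intro i
          rw [hkey]
          obtain ⟨m, hjm, hmc, hm⟩ := iterate_periodic _ k0 j c hjc' hj' i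
          rw [hm]
          exact hnh m hmc
        rw [← loopA_neverHalf C half hhalf hpos (f + 1) q1 q2 l count hql hl hiter]
      · rw [if_neg (fun h => hmem ((PySem.Set.contains_iff _ _).mp h))]
        have hkeyeq : keyOf C q1 l = (l, (l + q1.length) % C.length, q1.sum) := rfl
        have hseen' : ∀ k, k ∈ PySem.Set.add seen (l, (l + q1.length) % C.length, q1.sum) →
            ∃ m, m < c + 1 ∧ k = (stepK C C.length half)^[m] k0 := by
          intro k hk
          rcases (PySem.Set.mem_add _ _ _).mp hk with hk | hk
          · obtain ⟨m, hm, he⟩ := hseen k hk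
            exact ⟨m, by omega, he⟩
          · exact ⟨c, by omega, by rw [hk, ← hkeyeq, hkey]⟩
        have hnh' : ∀ m, m < c + 1 → ((stepK C C.length half)^[m] k0).2.2 ≠ half := by
          intro m hm
          rcases Nat.lt_or_ge m c with h | h
          · exact hnh m h
          · have : m = c := by omega
            rw [this, ← hkey]
            simpa [keyOf] using h1
        by_cases h2 : q1.sum > half
        · obtain ⟨v, q1t, hq1, hget, hrot, hl', hkeystep⟩ :=
            step_drain C q1 q2 l half hhalf hpos hql hl h2
          subst hq1
          have hgt' : (v :: q1t).sum > q2.sum := by omega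
          have hkey' : keyOf C q1t ((l + 1) % C.length) = (stepK C C.length half)^[c + 1] k0 := by
            rw [hkeystep, hkey]
            exact (Function.iterate_succ_apply' _ _ _).symm
          have hr : (l + (v :: q1t).length) % C.length
              = ((l + 1) % C.length + q1t.length) % C.length := by
            rw [Nat.mod_add_mod, List.length_cons]
            congr 1
            omega
          have hstepA : solutionLoopA (f + 1) (v :: q1t) q2 ((v :: q1t).sum) q2.sum count
              = solutionLoopA f q1t (q2 ++ [v]) q1t.sum ((q2 ++ [v]).sum) (count + 1) := by
            rw [loopA_succ, if_neg hne, if_pos hgt']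
            simp
          have hw : (v :: q1t).sum - C.getD l 0 = q1t.sum := by rw [hget]; simp
          rw [hr] at hseen'
          rw [if_pos h2, hstepA, hw, hr]
          exact ih q1t (q2 ++ [v]) ((l + 1) % C.length) (count + 1) (c + 1) k0 _
            hrot hl' hkey' hseen' hnh'
        · obtain ⟨v, q2t, hq2, hget, hrot, hkeystep⟩ :=
            step_fill C q1 q2 l half hhalf hpos hql hl h1 h2
          subst hq2
          have hlt' : ¬ q1.sum > (v :: q2t).sum := by omega
          have hkey' : keyOf C (q1 ++ [v]) l = (stepK C C.length half)^[c + 1] k0 := by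
            rw [hkeystep, hkey]
            exact (Function.iterate_succ_apply' _ _ _).symm
          have hr : ((l + q1.length) % C.length + 1) % C.length
              = (l + (q1 ++ [v]).length) % C.length := by
            rw [Nat.mod_add_mod, List.length_append, List.length_cons, List.length_nil]
            congr 1
          have hstepA : solutionLoopA (f + 1) q1 (v :: q2t) q1.sum ((v :: q2t).sum) count
              = solutionLoopA f (q1 ++ [v]) q2t ((q1 ++ [v]).sum) q2t.sum (count + 1) := by
            rw [loopA_succ, if_neg hne, if_neg hlt']
            simp
          have hw : q1.sum + C.getD ((l + q1.length) % C.length) 0 = (q1 ++ [v]).sum := by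
            rw [hget]; simp
          rw [if_neg h2, hstepA, hr, hw]
          exact ih (q1 ++ [v]) q2t l (count + 1) (c + 1) k0 _ hrot hl hkey' hseen' hnh'

-- unfolding the guards: both ports share the pre-loop computation
theorem solution_eq (queue1 queue2 : List Int) :
    solution queue1 queue2 =
      (if PySem.Int.mod (queue1.sum + queue2.sum) 2 ≠ 0 then -1
       else
         match PySem.List.max? (queue1 ++ queue2) (fun x => x) with
         | none => -1
         | some m =>
           if m > PySem.Int.floordiv (queue1.sum + queue2.sum) 2 then -1
           else solutionLoopA 300000 queue1 queue2 queue1.sum queue2.sum 0) := rfl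

theorem solution_alt_eq (queue1 queue2 : List Int) :
    solution_alt queue1 queue2 =
      (if PySem.Int.mod (queue1.sum + queue2.sum) 2 ≠ 0 then -1
       else
         match PySem.List.max? (queue1 ++ queue2) (fun x => x) with
         | none => -1
         | some m =>
           if m > PySem.Int.floordiv (queue1.sum + queue2.sum) 2 then -1
           else solutionLoopB (queue1 ++ queue2) (queue1 ++ queue2).length
                  (PySem.Int.floordiv (queue1.sum + queue2.sum) 2) 300000 PySem.Set.empty
                  0 (queue1.length % (queue1 ++ queue2).length) queue1.sum 0) := rfl

theorem solution_spec' (queue1 queue2 : List Int)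
    (hpre : Pre_solution queue1 queue2) :
    solution queue1 queue2 = solution_alt queue1 queue2 := by
  rw [solution_eq, solution_alt_eq]
  set total := queue1.sum + queue2.sum with htotdef
  by_cases hmod : PySem.Int.mod total 2 ≠ 0
  · rw [if_pos hmod, if_pos hmod]
  · rw [if_neg hmod, if_neg hmod]
    push_neg at hmod
    set half := PySem.Int.floordiv total 2 with hhalfdef
    have heven : total = 2 * half := by
      have h := PySem.Int.floordiv_mul_add_mod total 2
      omega
    rcases hmax : PySem.List.max? (queue1 ++ queue2) (fun x => x) with _ | m
    · rfl
    · by_cases hm : m > half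
      · simp [hm]
      · simp only [hm, if_false]
        push_neg at hm
        by_cases heq : queue1.sum = queue2.sum
        · have hw : queue1.sum = half := by omega
          have h300000 : (300000 : Nat) = 299999 + 1 := by norm_num
          rw [h300000, loopA_succ, loopB_succ, if_pos heq, if_pos hw]
        · -- reaching the loop with unequal sums forces 0 ≤ total (else Pre_ excludes the input)
          have hall : ∀ y ∈ queue1 ++ queue2, y ≤ half := fun y hy =>
            le_trans (PySem.List.max?_isMax hmax y hy) hm
          have hpos : 0 ≤ total := by
            by_contra hneg
            push_neg at hneg
            have hhalfneg : half < 0 := by omega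
            have hbound : (queue1 ++ queue2).sum ≤ (queue1 ++ queue2).length • half :=
              List.sum_le_card_nsmul _ _ hall
            rw [nsmul_eq_mul] at hbound
            have hCsum : (queue1 ++ queue2).sum = total := by rw [List.sum_append]
            rw [hCsum] at hbound
            have hlen2 : queue1.length + queue2.length ≤ 2 := by
              by_contra hlen
              push_neg at hlen
              have h3 : (3 : Int) ≤ ((queue1 ++ queue2).length : Int) := by
                simp only [List.length_append]; exact_mod_cast hlen
              nlinarith
            clear_value total half
            clear hmax hbound hCsum hmod
            unfold Pre_solution pvBadSide_solution at hpre
            rcases queue1 with _ | ⟨a, _ | ⟨a2, t1⟩⟩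
            · rcases queue2 with _ | ⟨b, _ | ⟨b2, t2⟩⟩
              · -- [] []
                exact hpre (Or.inl ⟨rfl, rfl⟩)
              · -- [] [b]
                simp only [List.sum_nil, List.sum_cons, add_zero, zero_add] at htotdef
                exact hpre (Or.inr (Or.inl ⟨rfl, Or.inl ⟨by rfl,
                  by simp only [List.getD_cons_zero]; omega,
                  by simp only [List.getD_cons_zero]; omega⟩⟩))
              · -- [] (b :: b2 :: t2): hlen2 forces t2 = []
                rcases t2 with _ | ⟨c, t3⟩
                · have hb : b ≤ half := hall b (by simp)
                  have hb2 : b2 ≤ half := hall b2 (by simp)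
                  simp only [List.sum_nil, List.sum_cons, add_zero, zero_add] at htotdef
                  exact hpre (Or.inr (Or.inl ⟨rfl, Or.inr ⟨by rfl,
                    by simp only [List.getD_cons_zero, List.getD_cons_succ]; omega,
                    by simp only [List.getD_cons_zero]; omega⟩⟩))
                · simp only [List.length_cons, List.length_nil] at hlen2; omega
            · rcases queue2 with _ | ⟨b, _ | ⟨b2, t2⟩⟩
              · -- [a] []
                simp only [List.sum_nil, List.sum_cons, add_zero, zero_add] at htotdef
                exact hpre (Or.inr (Or.inr ⟨rfl, Or.inl ⟨by rfl,
                  by simp only [List.getD_cons_zero]; omega,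
                  by simp only [List.getD_cons_zero]; omega⟩⟩))
              · -- [a] [b]: the guard forces a = b, contradicting heq
                have ha : a ≤ half := hall a (by simp)
                have hb : b ≤ half := hall b (by simp)
                simp only [List.sum_nil, List.sum_cons, add_zero, zero_add] at htotdef
                exact heq (by simp only [List.sum_nil, List.sum_cons, add_zero]; omega)
              · simp only [List.length_cons, List.length_nil] at hlen2; omega
            · rcases t1 with _ | ⟨c, t3⟩
              · rcases queue2 with _ | ⟨b, t2⟩
                · -- [a, a2] []
                  have ha : a ≤ half := hall a (by simp)
                  have ha2 : a2 ≤ half := hall a2 (by simp)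
                  simp only [List.sum_nil, List.sum_cons, add_zero, zero_add] at htotdef
                  exact hpre (Or.inr (Or.inr ⟨rfl, Or.inr ⟨by rfl,
                    by simp only [List.getD_cons_zero, List.getD_cons_succ]; omega,
                    by simp only [List.getD_cons_zero]; omega⟩⟩))
                · simp only [List.length_cons, List.length_nil] at hlen2; omega
              · simp only [List.length_cons, List.length_nil] at hlen2; omega
          have hCne : queue1 ++ queue2 ≠ [] := by
            intro h
            rw [h] at hmax
            simp [PySem.List.max?] at hmax
          have hn : 0 < (queue1 ++ queue2).length := List.length_pos_iff.mpr hCne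
          have hCs : (queue1 ++ queue2).sum = 2 * half := by rw [List.sum_append]; omega
          have hCp : 0 ≤ (queue1 ++ queue2).sum := by rw [List.sum_append]; omega
          have h := loop_sim (queue1 ++ queue2) half hCs hCp 300000 queue1 queue2 0 0 0
            (keyOf (queue1 ++ queue2) queue1 0) PySem.Set.empty
            (by simp) hn rfl (by intro k hk; simp [PySem.Set.empty] at hk)
            (by intro m hm; omega)
          simpa using h

-- ===== VERDICT (by name: the statement is the Claim_ definition above) =====
theorem solution_spec : Claim_equal_solution := by
  intro queue1 queue2 _ hpre
  unfold Spec_solution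
  exact solution_spec' queue1 queue2 hpre
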